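-- pv_equiv track=rewrite | github.com/alexluong/algorithms | leetcode/teemo-attacking/Solution.py | findPoisonedDuration
-- ===== SOURCE A (Python) =====
-- def findPoisonedDuration(timeSeries, duration):
--     """
--     :type timeSeries: List[int]
--     :type duration: int
--     :rtype: int
--     """
--     length = len(timeSeries)
--     if length == 0:
--         return 0
--     if length == 1:
--         return duration
--
--     total = 0
--     before = timeSeries[0]
--     for i in range(1, len(timeSeries)):
--         if timeSeries[i] - before >= duration:
--             total += duration
--         else:
--             total += timeSeries[i] - before
--         before = timeSeries[i]
--
--     total += duration
--     return total
-- ===== SOURCE B (Python) =====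
-- def findPoisonedDuration(timeSeries, duration):
--     # Divide and conquer: split at the midpoint, keeping the middle attack in
--     # both halves; each half is solved recursively and the shared attack's
--     # trailing full duration is counted twice, so subtract one duration.
--     n = len(timeSeries)
--     if n == 0:
--         return 0
--     if n == 1:
--         return duration
--     if n == 2:
--         return min(timeSeries[1] - timeSeries[0], duration) + duration
--     m = n // 2
--     return (findPoisonedDuration(timeSeries[:m + 1], duration)
--             + findPoisonedDuration(timeSeries[m:], duration)
--             - duration)
-- ===== Notes on version B (the rewrite author's own statement) =====
-- stated objective: alternative
-- what changed: Replaces A's single stateful left-to-right loop (total/before accumulators, guarded edge cases, trailing += duration) by divide and conquer: split the series at the midpoint keeping the middle attack in both halves, solve each half recursively, and subtract the one double-counted duration.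
import Mathlib
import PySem

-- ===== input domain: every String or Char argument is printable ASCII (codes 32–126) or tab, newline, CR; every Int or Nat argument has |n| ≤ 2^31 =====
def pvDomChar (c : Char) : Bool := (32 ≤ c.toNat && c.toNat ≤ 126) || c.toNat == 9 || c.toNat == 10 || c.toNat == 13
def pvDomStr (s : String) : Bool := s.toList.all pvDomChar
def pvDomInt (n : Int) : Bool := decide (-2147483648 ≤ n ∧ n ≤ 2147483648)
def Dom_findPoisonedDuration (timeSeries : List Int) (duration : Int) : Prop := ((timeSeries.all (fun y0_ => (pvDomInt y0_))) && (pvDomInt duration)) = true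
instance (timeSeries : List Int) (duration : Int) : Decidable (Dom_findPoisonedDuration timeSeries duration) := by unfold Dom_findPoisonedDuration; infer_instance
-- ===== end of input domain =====

-- B computes the same total by divide and conquer on the midpoint (shared boundary element, subtracting the double-counted duration) instead of A's stateful left-to-right loop; not faster.


-- ===== PORT A =====
def findPoisonedDuration (timeSeries : List Int) (duration : Int) : Int :=
  match timeSeries with
  | [] => 0
  | [_] => duration
  | t0 :: rest =>
    -- the loop over range(1, len): state (total, before)
    let st := rest.foldl (fun (st : Int × Int) ti =>
      if ti - st.2 ≥ duration then (st.1 + duration, ti) else (st.1 + (ti - st.2), ti)) (0, t0)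
    st.1 + duration

-- ===== PORT B =====
-- B: divide and conquer; ts[:m+1] is `take (m+1)` and ts[m:] is `drop m`
-- (exact here: 0 ≤ m < len timeSeries in this branch).
def findPoisonedDuration_alt (timeSeries : List Int) (duration : Int) : Int :=
  match timeSeries with
  | [] => 0
  | [_] => duration
  | [a, b] => min (b - a) duration + duration
  | t0 :: t1 :: t2 :: r =>
    let m := (t0 :: t1 :: t2 :: r).length / 2
    findPoisonedDuration_alt ((t0 :: t1 :: t2 :: r).take (m + 1)) duration
      + findPoisonedDuration_alt ((t0 :: t1 :: t2 :: r).drop m) duration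
      - duration
termination_by timeSeries.length
decreasing_by
  · simp only [List.length_take, List.length_cons]; omega
  · simp only [List.length_drop, List.length_cons]; omega

-- ===== PRECONDITION & SPEC =====
def Spec_findPoisonedDuration (timeSeries : List Int) (duration : Int) (out : Int) : Prop := out = findPoisonedDuration_alt timeSeries duration
instance (timeSeries : List Int) (duration : Int) (out : Int) : Decidable (Spec_findPoisonedDuration timeSeries duration out) := by unfold Spec_findPoisonedDuration; infer_instance

-- ===== CLAIM (what is proved, stated in full; the proofs are below) =====
def Claim_equal_findPoisonedDuration : Prop := ∀ (timeSeries : List Int) (duration : Int), Dom_findPoisonedDuration timeSeries duration → Spec_findPoisonedDuration timeSeries duration (findPoisonedDuration timeSeries duration)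

-- ===== LEMMAS AND PROOFS =====

-- reference value: sum of min(gap, d) over consecutive pairs
def pairsSum (d : Int) : List Int → Int
  | [] => 0
  | [_] => 0
  | a :: b :: r => min (b - a) d + pairsSum d (b :: r)

lemma pairsSum_glue (d x : Int) : ∀ (l1 l2 : List Int),
    pairsSum d (l1 ++ [x]) + pairsSum d (x :: l2) = pairsSum d (l1 ++ x :: l2) := by
  intro l1
  induction l1 with
  | nil => intro l2; simp [pairsSum]
  | cons a l1 ih =>
    intro l2
    cases l1 with
    | nil => simp [pairsSum]
    | cons b l1' =>
      simp only [List.cons_append, pairsSum] at *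
      rw [← ih l2]; ring

-- B equals the reference value + duration on nonempty lists
lemma alt_eq_pairsSum (d : Int) : ∀ (ts : List Int), ts ≠ [] →
    findPoisonedDuration_alt ts d = pairsSum d ts + d := by
  intro ts
  fun_induction findPoisonedDuration_alt ts d with
  | case1 => intro h; exact absurd rfl h
  | case2 x => intro _; simp [pairsSum]
  | case3 a b => intro _; simp [pairsSum]
  | case4 t0 t1 t2 r m ih1 ih2 =>
    intro _
    have hm : m = (t0 :: t1 :: t2 :: r).length / 2 := rfl
    set ts := t0 :: t1 :: t2 :: r with hts
    have hlen : 3 ≤ ts.length := by simp [hts]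
    have hm1 : 1 ≤ m ∧ m + 1 < ts.length := by
      simp only [hts, List.length_cons] at hm ⊢; omega
    have htake : ts.take (m + 1) ≠ [] := by simp [hts]
    have hdrop : ts.drop m ≠ [] := by
      intro h
      have := List.drop_eq_nil_iff.mp h
      omega
    rw [ih1 htake, ih2 hdrop]
    have hmlt : m < ts.length := by omega
    have hgetm : ts.drop m = ts[m] :: ts.drop (m + 1) :=
      List.drop_eq_getElem_cons hmlt
    have htake' : ts.take (m + 1) = ts.take m ++ [ts[m]] :=
      List.take_succ_eq_append_getElem hmlt
    have hsplit : ts.take m ++ ts[m] :: ts.drop (m + 1) = ts := by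
      rw [← hgetm, List.take_append_drop]
    have hglue := pairsSum_glue d ts[m] (ts.take m) (ts.drop (m + 1))
    rw [htake', hgetm, hsplit] at *
    omega

-- A's loop, started with accumulator `total`, ends at total + pairsSum d (t0 :: rest)
lemma fpd_loop (d : Int) : ∀ (rest : List Int) (t0 total : Int),
    (rest.foldl (fun (st : Int × Int) ti =>
        if ti - st.2 ≥ d then (st.1 + d, ti) else (st.1 + (ti - st.2), ti)) (total, t0)).1
    = total + pairsSum d (t0 :: rest) := by
  intro rest
  induction rest with
  | nil => intro t0 total; simp [pairsSum]
  | cons t1 r ih =>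
    intro t0 total
    simp only [List.foldl_cons]
    by_cases h : t1 - t0 ≥ d
    · rw [if_pos h, ih t1 (total + d)]
      simp only [pairsSum]
      omega
    · rw [if_neg h, ih t1 (total + (t1 - t0))]
      simp only [pairsSum]
      omega

theorem findPoisonedDuration_spec : Claim_equal_findPoisonedDuration := by
  intro ts d _
  unfold Spec_findPoisonedDuration findPoisonedDuration
  match ts with
  | [] => simp [findPoisonedDuration_alt]
  | [x] => simp [findPoisonedDuration_alt]
  | t0 :: t1 :: r =>
    simp only
    rw [fpd_loop d (t1 :: r) t0 0,
      alt_eq_pairsSum d (t0 :: t1 :: r) (by simp)]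
    omega
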